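-- pv_equiv track=rewrite | github.com/pedrovmcastro/python-basic-to-advanced | 06_comprehensions/6-02_fruits_1.py | count_vowel
-- ===== SOURCE A (Python) =====
-- def count_vowel(fruit):
--     vowels = ['a', 'e', 'i', 'o', 'u']
--     vowel_count = 0
--     for char in fruit:
--         if char in vowels:
--             vowels.remove(char)
--             vowel_count += 1
--     if vowel_count > 2:
--         return 1
--     return 0
-- ===== SOURCE B (Python) =====
-- def count_vowel(fruit):
--     return 1 if len(set(fruit) & {'a', 'e', 'i', 'o', 'u'}) > 2 else 0
-- ===== Notes on version B (the rewrite author's own statement) =====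
-- stated objective: simpler
-- what changed: Replaces the per-character scan with removal bookkeeping on a shrinking vowel list by a single set intersection: the distinct-vowel count is the size of the intersection of set(fruit) with the fixed vowel set.
import Mathlib
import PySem

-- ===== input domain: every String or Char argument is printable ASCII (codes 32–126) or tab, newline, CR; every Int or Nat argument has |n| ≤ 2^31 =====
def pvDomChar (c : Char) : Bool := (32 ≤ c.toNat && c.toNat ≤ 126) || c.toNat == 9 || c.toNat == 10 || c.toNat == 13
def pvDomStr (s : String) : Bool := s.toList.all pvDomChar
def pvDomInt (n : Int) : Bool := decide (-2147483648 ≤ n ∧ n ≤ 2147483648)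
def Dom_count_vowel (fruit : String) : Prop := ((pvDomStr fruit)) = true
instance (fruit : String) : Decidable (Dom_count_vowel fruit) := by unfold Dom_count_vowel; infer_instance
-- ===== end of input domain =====

-- B replaces A's scan-and-remove counting by a set intersection with the vowel set (simpler).

-- ===== PORT A =====
-- the for-loop: state is (remaining vowels list, vowel_count); 'vowels.remove(char)' only
-- runs under the 'char in vowels' guard, so remove? is always some there ('.getD vs' is unreachable).
def countVowelLoop : List Char → List Char → Int → Int
  | [], _, c => c
  | ch :: rest, vs, c =>
    if vs.contains ch then
      countVowelLoop rest ((PySem.List.remove? vs ch).getD vs) (c + 1)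
    else
      countVowelLoop rest vs c

def count_vowel (fruit : String) : Int :=
  let vowel_count := countVowelLoop fruit.toList ['a', 'e', 'i', 'o', 'u'] 0
  if vowel_count > 2 then 1 else 0

-- ===== PORT B =====
def count_vowel_alt (fruit : String) : Int :=
  if PySem.Set.len
      (PySem.Set.inter (PySem.Set.ofList fruit.toList)
        (PySem.Set.ofList ['a', 'e', 'i', 'o', 'u'])) > 2
  then 1 else 0

-- ===== PRECONDITION & SPEC =====
def Spec_count_vowel (fruit : String) (out : Int) : Prop := out = count_vowel_alt fruit
instance (fruit : String) (out : Int) : Decidable (Spec_count_vowel fruit out) := by unfold Spec_count_vowel; infer_instance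

-- ===== CLAIM (what is proved, stated in full; the proofs are below) =====
def Claim_equal_count_vowel : Prop := ∀ (fruit : String), Dom_count_vowel fruit → Spec_count_vowel fruit (count_vowel fruit)

-- ===== LEMMAS AND PROOFS =====

-- A's loop counts exactly the vowels of vs that occur in l (each removed once, vs has no duplicates).
theorem countVowelLoop_eq_filter (l : List Char) :
    ∀ (vs : List Char) (c : Int), vs.Nodup →
      countVowelLoop l vs c = c + ((vs.filter (fun v => l.contains v)).length : Int) := by
  induction l with
  | nil => intro vs c _; simp [countVowelLoop]
  | cons ch rest ih =>
    intro vs c hnd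
    by_cases hch : vs.contains ch
    · have hmem : ch ∈ vs := by simpa using hch
      simp only [countVowelLoop]
      rw [if_pos hch, PySem.List.remove?_eq_some_erase _ _ hmem, Option.getD_some]
      rw [ih _ _ (hnd.erase ch)]
      have hperm : List.Perm vs (ch :: vs.erase ch) := List.perm_cons_erase hmem
      have hlen : (vs.filter (fun v => (ch :: rest).contains v)).length
          = ((ch :: vs.erase ch).filter (fun v => (ch :: rest).contains v)).length :=
        (hperm.filter _).length_eq
      have hfc : ((vs.erase ch).filter (fun v => v == ch || rest.contains v))
          = ((vs.erase ch).filter (fun v => rest.contains v)) := by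
        apply List.filter_congr
        intro v hv
        have hne : v ≠ ch := ((List.Nodup.mem_erase_iff hnd).1 hv).1
        simp [hne]
      rw [hlen]
      simp only [List.filter_cons]
      simp only [List.contains_cons, BEq.rfl, Bool.true_or, if_pos]
      rw [hfc]
      simp only [List.length_cons]
      push_cast
      ring
    · simp only [countVowelLoop]
      rw [if_neg hch, ih _ _ hnd]
      have : (vs.filter (fun v => (ch :: rest).contains v))
          = (vs.filter (fun v => rest.contains v)) := by
        apply List.filter_congr
        intro v hv
        have hne : v ≠ ch := by
          intro h; subst h; exact hch (by simpa using hv)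
        simp [hne]
      rw [this]

-- counting vowels present in l equals counting distinct chars of l that are vowels
theorem filter_length_swap (l vs : List Char) (hvs : vs.Nodup) :
    ((vs.filter (fun v => l.contains v)).length : Int)
      = PySem.Set.len (PySem.Set.inter (PySem.Set.ofList l) vs) := by
  have h1 : (vs.filter (fun v => l.contains v)).Nodup := hvs.filter _
  have h2 : (PySem.Set.inter (PySem.Set.ofList l) vs).Nodup :=
    PySem.Set.nodup_inter (PySem.Set.ofList l) vs (PySem.Set.nodup_ofList l)
  have hperm : List.Perm (vs.filter (fun v => l.contains v)) (PySem.Set.inter (PySem.Set.ofList l) vs) := by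
    rw [List.perm_ext_iff_of_nodup h1 h2]
    intro a
    simp [List.mem_filter, PySem.Set.mem_inter, PySem.Set.mem_ofList, and_comm]
  have hl := hperm.length_eq
  simp only [PySem.Set.len, PySem.List.len_eq, hl]

-- ===== VERDICT (by name: the statement is the Claim_ definition above) =====
theorem count_vowel_spec : Claim_equal_count_vowel := by
  intro fruit _
  unfold Spec_count_vowel count_vowel count_vowel_alt
  have hnd : (['a', 'e', 'i', 'o', 'u'] : List Char).Nodup := by decide
  rw [countVowelLoop_eq_filter _ _ _ hnd, filter_length_swap _ _ hnd]
  have : PySem.Set.ofList (['a', 'e', 'i', 'o', 'u'] : List Char) = ['a', 'e', 'i', 'o', 'u'] := by decide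
  rw [this]
  simp [PySem.Set.len, PySem.List.len_eq]
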